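-- pv_equiv track=rewrite | github.com/SuJeongGong/Programmers_quiz | Level1/부족한금액계산하기.py | solution
-- ===== SOURCE A (Python) =====
-- def solution(price, money, count):
--     sum = 0
--     for x in range(1, count+1):
--         sum += price * x
--
--     if money >= sum:
--         return 0
--     else:
--         return sum - money
-- ===== SOURCE B (Python) =====
-- def solution(price, money, count):
--     n = count if count > 0 else 0
--     total = price * (n * (n + 1) // 2)
--     shortfall = total - money
--     return shortfall if shortfall > 0 else 0
-- ===== Notes on version B (the rewrite author's own statement) =====
-- stated objective: faster
-- what changed: Replaced the O(count) accumulation loop over range(1, count+1) with the closed-form Gauss sum price*count*(count+1)//2.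
import Mathlib
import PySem

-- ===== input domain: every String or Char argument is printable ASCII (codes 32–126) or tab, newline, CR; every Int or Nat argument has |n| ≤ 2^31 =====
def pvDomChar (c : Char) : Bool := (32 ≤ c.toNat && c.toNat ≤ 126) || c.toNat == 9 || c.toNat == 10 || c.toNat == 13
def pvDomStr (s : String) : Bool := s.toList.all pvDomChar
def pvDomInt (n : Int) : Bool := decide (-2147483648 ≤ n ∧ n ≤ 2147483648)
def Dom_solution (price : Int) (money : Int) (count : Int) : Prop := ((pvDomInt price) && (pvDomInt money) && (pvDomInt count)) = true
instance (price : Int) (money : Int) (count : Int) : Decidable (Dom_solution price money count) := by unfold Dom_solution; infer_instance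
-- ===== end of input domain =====

-- B replaces the O(count) accumulation loop with the closed-form Gauss sum (objective: faster, asymptotic).

-- ===== PORT A =====
def solution (price : Int) (money : Int) (count : Int) : Int :=
  let sum := (PySem.List.pyRange 1 (count + 1) 1).foldl (fun s x => s + price * x) 0
  if money ≥ sum then 0 else sum - money

-- ===== PORT B =====
def solution_alt (price : Int) (money : Int) (count : Int) : Int :=
  let n := if count > 0 then count else 0
  let total := price * PySem.Int.floordiv (n * (n + 1)) 2
  let shortfall := total - money
  if shortfall > 0 then shortfall else 0

-- ===== PRECONDITION & SPEC =====
def Spec_solution (price : Int) (money : Int) (count : Int) (out : Int) : Prop := out = solution_alt price money count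
instance (price : Int) (money : Int) (count : Int) (out : Int) : Decidable (Spec_solution price money count out) := by unfold Spec_solution; infer_instance

-- ===== CLAIM (what is proved, stated in full; the proofs are below) =====
def Claim_equal_solution : Prop := ∀ (price : Int) (money : Int) (count : Int), Dom_solution price money count → Spec_solution price money count (solution price money count)

-- ===== LEMMAS AND PROOFS =====

-- The loop's accumulated sum, starting from any accumulator s.
lemma foldl_gauss (price : Int) (n : Nat) :
    (PySem.List.pyRange 1 ((n : Int) + 1) 1).foldl (fun s x => s + price * x) 0
      = price * PySem.Int.floordiv ((n : Int) * ((n : Int) + 1)) 2 := by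
  -- first: foldl from s shifts additively; prove the un-divided identity 2·sum = price·n·(n+1)
  have key : ∀ (m : Nat) (s : Int),
      (PySem.List.pyRange 1 ((m : Int) + 1) 1).foldl (fun s x => s + price * x) s
        = s + price * (Finset.range (m + 1)).sum (fun k => (k : Int)) := by
    intro m
    induction m with
    | zero =>
      intro s
      simp [PySem.List.pyRange_one_eq_nil (by norm_num : (1:Int) ≤ 1)]
    | succ k ih =>
      intro s
      have hsplit : PySem.List.pyRange 1 ((k : Int) + 1 + 1) 1
          = PySem.List.pyRange 1 ((k : Int) + 1) 1 ++ [(k : Int) + 1] :=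
        PySem.List.pyRange_one_succ_right (by omega)
      push_cast
      rw [show ((k : Int) + 1 + 1 : Int) = ((k : Int) + 1) + 1 from rfl, hsplit,
          List.foldl_append, ih s]
      simp [Finset.sum_range_succ]
      ring
  have hsum : (Finset.range (n + 1)).sum (fun k => (k : Int)) * 2 = (n : Int) * ((n : Int) + 1) := by
    induction n with
    | zero => simp
    | succ k ih =>
      rw [Finset.sum_range_succ, add_mul, ih]
      push_cast
      ring
  rw [key n 0, zero_add]
  congr 1
  have h2 : ((n : Int) * ((n : Int) + 1)) = 2 * (Finset.range (n + 1)).sum (fun k => (k : Int)) := by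
    omega
  rw [h2, PySem.Int.floordiv_eq_ediv_of_pos (by norm_num)]
  omega

-- ===== VERDICT (by name: the statement is the Claim_ definition above) =====
theorem solution_spec : Claim_equal_solution := by
  intro price money count _
  unfold Spec_solution solution solution_alt
  by_cases hc : count > 0
  · obtain ⟨n, hn⟩ : ∃ n : Nat, count = (n : Int) := ⟨count.toNat, by omega⟩
    subst hn
    simp only [if_pos hc]
    rw [foldl_gauss price n]
    split_ifs with h1 h2 <;> omega
  · have hnil : PySem.List.pyRange 1 (count + 1) 1 = [] :=
      PySem.List.pyRange_one_eq_nil (by omega)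
    simp only [if_neg hc, hnil, List.foldl_nil]
    have : PySem.Int.floordiv (0 * (0 + 1)) 2 = 0 := by decide
    rw [this]
    split_ifs <;> omega
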